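-- pv_equiv track=rewrite | github.com/MF-Guilherme/Python-Exercises | Exercicios/Treinamento6/teste.py | contagemValores
-- ===== SOURCE A (Python) =====
-- def contagemValores(matriz) :
--
--     somaContagem = 0
--     cont = 0
--     for lista in matriz :
--         i = 0
--         for valor in lista :
--             i += 1
--         cont += 1
--         somaContagem += (i - cont)
--     return somaContagem
-- ===== SOURCE B (Python) =====
-- def contagemValores(matriz):
--     total = 0
--     n = 0
--     for lista in matriz:
--         total += len(lista)
--         n += 1
--     return total - n * (n + 1) // 2
-- ===== Notes on version B (the rewrite author's own statement) =====
-- stated objective: simpler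
-- what changed: Accumulate only the sum of row lengths and a row count in one pass, then subtract the triangular number n*(n+1)//2 instead of maintaining a running per-row index subtraction.
import Mathlib
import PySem

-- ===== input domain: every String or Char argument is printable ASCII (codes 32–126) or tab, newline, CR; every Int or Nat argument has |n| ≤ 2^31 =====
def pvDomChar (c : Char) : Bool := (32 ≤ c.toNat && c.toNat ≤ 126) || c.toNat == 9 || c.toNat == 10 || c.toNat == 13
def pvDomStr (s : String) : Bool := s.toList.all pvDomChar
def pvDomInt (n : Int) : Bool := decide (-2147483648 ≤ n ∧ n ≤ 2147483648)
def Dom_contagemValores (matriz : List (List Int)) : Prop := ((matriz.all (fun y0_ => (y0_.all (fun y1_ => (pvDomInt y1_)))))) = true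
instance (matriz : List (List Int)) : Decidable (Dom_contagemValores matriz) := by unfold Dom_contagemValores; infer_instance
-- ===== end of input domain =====

-- B replaces the running per-row index subtraction with a single pass summing row lengths plus a
-- closed-form triangular-number subtraction (objective: simpler).

-- ===== PORT A =====
-- Sum over rows of (row length − 1-based row index) maintained exactly as A does.
def contagemValores (matriz : List (List Int)) : Int :=
  (matriz.foldl (fun (st : Int × Int) lista =>
    let i : Int := lista.foldl (fun i _ => i + 1) 0
    let cont := st.2 + 1
    (st.1 + (i - cont), cont)) (0, 0)).1

-- ===== PORT B =====
-- B: one pass keeping (total length sum, row count); closed-form triangular subtraction at the end.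
def contagemValores_alt (matriz : List (List Int)) : Int :=
  let st := matriz.foldl (fun (st : Int × Int) lista => (st.1 + lista.length, st.2 + 1)) (0, 0)
  st.1 - PySem.Int.floordiv (st.2 * (st.2 + 1)) 2

-- ===== PRECONDITION & SPEC =====
def Spec_contagemValores (matriz : List (List Int)) (out : Int) : Prop := out = contagemValores_alt matriz
instance (matriz : List (List Int)) (out : Int) : Decidable (Spec_contagemValores matriz out) := by unfold Spec_contagemValores; infer_instance

-- ===== CLAIM (what is proved, stated in full; the proofs are below) =====
def Claim_equal_contagemValores : Prop := ∀ (matriz : List (List Int)), Dom_contagemValores matriz → Spec_contagemValores matriz (contagemValores matriz)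

-- ===== LEMMAS AND PROOFS =====

lemma inner_len (l : List Int) : l.foldl (fun (i : Int) _ => i + 1) 0 = (l.length : Int) := by
  have h : ∀ (a : Int), l.foldl (fun (i : Int) _ => i + 1) a = a + l.length := by
    induction l with
    | nil => simp
    | cons x xs ih => intro a; simp [List.foldl, ih]; ring
  simpa using h 0

lemma b_fold_shift (ls : List (List Int)) : ∀ (t n : Int),
    ls.foldl (fun (st : Int × Int) lista => (st.1 + lista.length, st.2 + 1)) (t, n)
    = (t + (ls.foldl (fun (st : Int × Int) lista => (st.1 + lista.length, st.2 + 1)) (0, 0)).1,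
       n + (ls.length : Int)) := by
  induction ls with
  | nil => intro t n; simp
  | cons x xs ih =>
    intro t n
    simp only [List.foldl]
    rw [ih, ih (0 + (x.length : Int)) (0 + 1)]
    simp only [Prod.mk.injEq]
    exact ⟨by ring, by simp [List.length_cons]; push_cast; ring⟩

lemma main_inv (matriz : List (List Int)) : ∀ (s c : Int),
    (matriz.foldl (fun (st : Int × Int) lista =>
      (st.1 + ((lista.length : Int) - (st.2 + 1)), st.2 + 1)) (s, c)).1
    = s + (matriz.foldl (fun (st : Int × Int) lista => (st.1 + lista.length, st.2 + 1)) (0, 0)).1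
        - ((matriz.length : Int) * c + ((matriz.length : Int) * ((matriz.length : Int) + 1)) / 2) := by
  induction matriz with
  | nil => intro s c; simp
  | cons l ls ih =>
    intro s c
    simp only [List.foldl]
    rw [ih, b_fold_shift ls (0 + (l.length : Int)) (0 + 1)]
    have e1 : ((ls.length : Int) + 1) * (((ls.length : Int) + 1) + 1)
        = (ls.length : Int) * ((ls.length : Int) + 1) + 2 * ((ls.length : Int) + 1) := by ring
    have e2 : ((ls.length : Int)) * (c + 1) = (ls.length : Int) * c + (ls.length : Int) := by ring
    have e3 : ((ls.length : Int) + 1) * c = (ls.length : Int) * c + c := by ring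
    simp only [List.length_cons]
    push_cast
    omega

-- ===== VERDICT (by name: the statement is the Claim_ definition above) =====
theorem contagemValores_spec : Claim_equal_contagemValores := by
  intro m _
  unfold Spec_contagemValores
  simp only [contagemValores, contagemValores_alt, inner_len]
  rw [main_inv m 0 0]
  have hsnd : (m.foldl (fun (st : Int × Int) lista => (st.1 + lista.length, st.2 + 1)) (0, 0)).2
      = (m.length : Int) := by rw [b_fold_shift m 0 0]; simp
  rw [PySem.Int.floordiv, hsnd]
  rw [Int.fdiv_eq_ediv_of_nonneg _ (by positivity)]
  ring
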